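-- pv_equiv track=rewrite | github.com/avasileios/Advent-of-Code-Solutions | 2017/Day-07-Challenge/day7p2.py | get_tower_weight
-- ===== SOURCE A (Python) =====
-- from typing import Set, Dict, List, Tuple
--
-- def get_tower_weight(program_name: str, children_map: Dict[str, List[str]], weights: Dict[str, int], weight_cache: Dict[str, int]) -> int:
--     """
--     Recursively calculates the total weight of the sub-tower starting at program_name.
--     Uses memoization (weight_cache).
--     """
--     if program_name in weight_cache:
--         return weight_cache[program_name]
--
--     # Start with the program's own weight
--     total_weight = weights[program_name]
--
--     # Add the weight of all sub-towers sitting on its disc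
--     if program_name in children_map:
--         for child in children_map[program_name]:
--             total_weight += get_tower_weight(child, children_map, weights, weight_cache)
--
--     weight_cache[program_name] = total_weight
--     return total_weight
-- ===== SOURCE B (Python) =====
-- def get_tower_weight(program_name, children_map, weights, weight_cache):
--     """Bottom-up fixpoint instead of top-down memoized recursion: repeatedly
--     resolve every program whose children are all resolved, then look up the
--     answer.  Does not mutate weight_cache (A writes computed totals into it)."""
--     totals = dict(weight_cache)
--     changed = True
--     while changed:
--         changed = False
--         for name, w in weights.items():
--             if name in totals:
--                 continue
--             kids = children_map.get(name, [])
--             if all(c in totals for c in kids):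
--                 totals[name] = w + sum(totals[c] for c in kids)
--                 changed = True
--     return totals[program_name]
-- ===== Notes on version B (the rewrite author's own statement) =====
-- stated objective: alternative
-- what changed: Replaces the top-down memoized recursion by an iterative bottom-up fixpoint: repeatedly resolve every program whose children are all already resolved, then look the answer up (no recursion, weight_cache is not mutated).
import Mathlib
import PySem

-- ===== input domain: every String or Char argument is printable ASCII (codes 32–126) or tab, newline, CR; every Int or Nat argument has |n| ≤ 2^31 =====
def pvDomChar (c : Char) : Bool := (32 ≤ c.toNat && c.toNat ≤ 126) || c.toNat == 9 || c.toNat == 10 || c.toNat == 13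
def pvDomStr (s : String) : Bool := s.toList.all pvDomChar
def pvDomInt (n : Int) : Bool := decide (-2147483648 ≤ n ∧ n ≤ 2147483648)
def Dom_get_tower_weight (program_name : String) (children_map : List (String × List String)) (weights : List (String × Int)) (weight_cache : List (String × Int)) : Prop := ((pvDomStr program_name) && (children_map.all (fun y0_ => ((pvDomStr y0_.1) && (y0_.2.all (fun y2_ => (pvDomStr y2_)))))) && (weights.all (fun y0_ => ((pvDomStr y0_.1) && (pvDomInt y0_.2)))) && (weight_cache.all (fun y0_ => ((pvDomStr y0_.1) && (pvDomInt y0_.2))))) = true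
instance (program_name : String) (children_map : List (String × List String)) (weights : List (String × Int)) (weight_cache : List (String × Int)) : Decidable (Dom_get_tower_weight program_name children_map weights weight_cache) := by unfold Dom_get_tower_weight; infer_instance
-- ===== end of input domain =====

-- B replaces A's top-down memoized recursion by an iterative bottom-up fixpoint (no recursion);
-- equivalence is about the RETURN value only: Python A writes computed totals into weight_cache, B does not mutate it.

-- first-match association-list lookup (= lookup in a Python dict, which has unique keys); shared by both ports
def pvLk {α : Type} : List (String × α) → String → Option α
  | [], _ => none
  | (k, v) :: rest, n => if k = n then some v else pvLk rest n

-- ===== PORT A =====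
-- fuel-bounded transliteration of A's recursion (fuel only makes it total: under Pre_ the
-- recursion depth is < weights.length + 1, so the fuel is never exhausted there)
mutual
def goA (cm : List (String × List String)) (ws : List (String × Int)) (fuel : Nat) (n : String) (cache : List (String × Int)) : Option (Int × List (String × Int)) :=
  match fuel with
  | 0 => none
  | fuel+1 =>
    match pvLk cache n with
    | some v => some (v, cache)                       -- if program_name in weight_cache: return weight_cache[program_name]
    | none =>
      match pvLk ws n with
      | none => none                                  -- weights[program_name] raises KeyError
      | some w =>
        match goAs cm ws fuel (match pvLk cm n with | some kids => kids | none => []) w cache with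
        | none => none
        | some (total, cache') => some (total, cache' ++ [(n, total)])   -- weight_cache[program_name] = total (fresh key)

termination_by (fuel, 0)

def goAs (cm : List (String × List String)) (ws : List (String × Int)) (fuel : Nat) (l : List String) (total : Int) (cache : List (String × Int)) : Option (Int × List (String × Int)) :=
  match l with
  | [] => some (total, cache)
  | c :: rest =>
    match goA cm ws fuel c cache with
    | none => none
    | some (v, cache') => goAs cm ws fuel rest (total + v) cache'
termination_by (fuel, l.length + 1)
end

def get_tower_weight (program_name : String) (children_map : List (String × List String)) (weights : List (String × Int)) (weight_cache : List (String × Int)) : Int :=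
  match goA children_map weights (weights.length + 1) program_name weight_cache with
  | some (total, _) => total
  | none => 0                                          -- KeyError / unbounded recursion: excluded by Pre_

-- ===== PORT B =====
-- one pass of "for name, w in weights.items(): …" over the remaining pairs
def passB (cm : List (String × List String)) : List (String × Int) → List (String × Int) × Bool → List (String × Int) × Bool
  | [], st => st
  | (k, w) :: rest, (totals, ch) =>
    if (pvLk totals k).isSome then passB cm rest (totals, ch)
    else
      let kids := (pvLk cm k).getD []
      if kids.all (fun c => (pvLk totals c).isSome) then
        passB cm rest (totals ++ [(k, w + kids.foldl (fun s c => s + (pvLk totals c).getD 0) 0)], true)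
      else passB cm rest (totals, ch)

-- "while changed:" — at most weights.length passes can set changed (each adds a new key from
-- weights), so fuel weights.length + 1 is never exhausted: the loop always exits via changed = False
def loopB (cm : List (String × List String)) (ws : List (String × Int)) : Nat → List (String × Int) → List (String × Int)
  | 0, totals => totals
  | f+1, totals =>
    match passB cm ws (totals, false) with
    | (t', true) => loopB cm ws f t'
    | (t', false) => t'

def get_tower_weight_alt (program_name : String) (children_map : List (String × List String)) (weights : List (String × Int)) (weight_cache : List (String × Int)) : Int :=
  (pvLk (loopB children_map weights (weights.length + 1) weight_cache) program_name).getD 0   -- totals[program_name]; KeyError excluded by Pre_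

-- ===== PRECONDITION & SPEC =====
-- one bottom-up step: add every weights key whose children are all already resolvable
def stepR (cm : List (String × List String)) (ws : List (String × Int)) (s : List String) : List String :=
  s ++ (ws.map Prod.fst).filter (fun k => !s.contains k && ((List.lookup k cm).getD []).all s.contains)

def satR (cm : List (String × List String)) (ws : List (String × Int)) : Nat → List String → List String
  | 0, s => s
  | i+1, s => satR cm ws i (stepR cm ws s)

-- Pre_ = exactly the inputs on which Python A returns: program_name lies in the least set of
-- resolvable programs (cached keys, plus weighted programs all of whose children are resolvable;
-- outside it A hits a KeyError or recurses forever on a cycle).  The Nodup conjunct only rules out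
-- duplicate-key weights lists, which represent no Python dict input at all.
def Pre_get_tower_weight (program_name : String) (children_map : List (String × List String)) (weights : List (String × Int)) (weight_cache : List (String × Int)) : Prop :=
  (satR children_map weights weights.length (weight_cache.map Prod.fst)).contains program_name = true
  ∧ (weights.map Prod.fst).Nodup
instance (program_name : String) (children_map : List (String × List String)) (weights : List (String × Int)) (weight_cache : List (String × Int)) : Decidable (Pre_get_tower_weight program_name children_map weights weight_cache) := by unfold Pre_get_tower_weight; infer_instance

def pvWitness_get_tower_weight : String × (List (String × List String)) × (List (String × Int)) × (List (String × Int)) :=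
  ("a", [("a", ["b", "c"])], [("a", 10), ("b", 2), ("c", 3)], [("c", 7)])

def Spec_get_tower_weight (program_name : String) (children_map : List (String × List String)) (weights : List (String × Int)) (weight_cache : List (String × Int)) (out : Int) : Prop := out = get_tower_weight_alt program_name children_map weights weight_cache
instance (program_name : String) (children_map : List (String × List String)) (weights : List (String × Int)) (weight_cache : List (String × Int)) (out : Int) : Decidable (Spec_get_tower_weight program_name children_map weights weight_cache out) := by unfold Spec_get_tower_weight; infer_instance

-- ===== CLAIM (what is proved, stated in full; the proofs are below) =====
def Claim_equal_get_tower_weight : Prop := ∀ (program_name : String) (children_map : List (String × List String)) (weights : List (String × Int)) (weight_cache : List (String × Int)), Dom_get_tower_weight program_name children_map weights weight_cache → Pre_get_tower_weight program_name children_map weights weight_cache → Spec_get_tower_weight program_name children_map weights weight_cache (get_tower_weight program_name children_map weights weight_cache)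

-- ===== LEMMAS AND PROOFS =====

-- the common denotation: pure fuel-bounded tower weight (cache consulted, never written)
mutual
def Wd (cm : List (String × List String)) (ws c0 : List (String × Int)) (fuel : Nat) (n : String) : Option Int :=
  match fuel with
  | 0 => none
  | fuel+1 =>
    match pvLk c0 n with
    | some v => some v
    | none =>
      match pvLk ws n with
      | none => none
      | some w => Wl cm ws c0 fuel ((pvLk cm n).getD []) w

termination_by (fuel, 0)

def Wl (cm : List (String × List String)) (ws c0 : List (String × Int)) (fuel : Nat) (l : List String) (total : Int) : Option Int :=
  match l with
  | [] => some total
  | c :: rest =>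
    match Wd cm ws c0 fuel c with
    | none => none
    | some v => Wl cm ws c0 fuel rest (total + v)
termination_by (fuel, l.length + 1)
end

-- cache-extension order, key coverage, and the soundness invariant used by both directions
def SubK (t t' : List (String × Int)) : Prop := ∀ k v, pvLk t k = some v → pvLk t' k = some v
def KeysIn (s : List String) (t : List (String × Int)) : Prop := ∀ k, s.contains k = true → (pvLk t k).isSome = true
def InvW (cm : List (String × List String)) (ws c0 t : List (String × Int)) : Prop := ∀ k v, pvLk t k = some v → ∃ g, Wd cm ws c0 g k = some v

theorem pvLk_append_some {α : Type} (xs ys : List (String × α)) (n : String) (v : α) (h : pvLk xs n = some v) : pvLk (xs ++ ys) n = some v := by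
  induction xs with
  | nil => simp [pvLk] at h
  | cons p rest ih =>
    obtain ⟨k, w⟩ := p
    by_cases hk : k = n <;> simp [pvLk, hk] at h ⊢ <;> simp_all

theorem pvLk_append_none {α : Type} (xs ys : List (String × α)) (n : String) (h : pvLk xs n = none) : pvLk (xs ++ ys) n = pvLk ys n := by
  induction xs with
  | nil => simp [pvLk]
  | cons p rest ih =>
    obtain ⟨k, w⟩ := p
    by_cases hk : k = n <;> simp [pvLk, hk] at h ⊢ <;> simp_all

theorem pvLk_isSome_iff {α : Type} (xs : List (String × α)) (n : String) : (pvLk xs n).isSome = true ↔ n ∈ xs.map Prod.fst := by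
  induction xs with
  | nil => simp [pvLk]
  | cons p rest ih =>
    obtain ⟨k, w⟩ := p
    by_cases hk : k = n <;> simp [pvLk, hk, ih] <;> tauto

theorem pvLk_of_mem_nodup {α : Type} (xs : List (String × α)) (k : String) (v : α) (hnd : (xs.map Prod.fst).Nodup) (hm : (k, v) ∈ xs) : pvLk xs k = some v := by
  induction xs with
  | nil => simp at hm
  | cons p rest ih =>
    obtain ⟨k0, w0⟩ := p
    simp only [List.map_cons, List.nodup_cons] at hnd
    rcases List.mem_cons.1 hm with h | h
    · cases h; simp [pvLk]
    · have hk : k0 ≠ k := by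
        intro he; exact hnd.1 (he ▸ (List.mem_map.2 ⟨(k, v), h, rfl⟩))
      simp [pvLk, hk, ih hnd.2 h]

theorem lookup_eq_pvLk {α : Type} (xs : List (String × α)) (n : String) : List.lookup n xs = pvLk xs n := by
  induction xs with
  | nil => simp [pvLk]
  | cons p rest ih =>
    obtain ⟨k, w⟩ := p
    by_cases hk : k = n
    · subst hk; simp [List.lookup, pvLk]
    · have hb : (n == k) = false := by
        simp [hk, Ne.symm hk]
      simp [List.lookup, pvLk, hk, hb, ih]

theorem SubK_refl (t : List (String × Int)) : SubK t t := fun _ _ h => h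
theorem SubK_trans {a b c : List (String × Int)} (h1 : SubK a b) (h2 : SubK b c) : SubK a c := fun k v h => h2 k v (h1 k v h)
theorem SubK_append (t u : List (String × Int)) : SubK t (t ++ u) := fun k v h => pvLk_append_some t u k v h
theorem KeysIn_mono {s : List String} {t t' : List (String × Int)} (hs : SubK t t') (h : KeysIn s t) : KeysIn s t' := by
  intro k hk
  obtain ⟨v, hv⟩ := Option.isSome_iff_exists.1 (h k hk)
  exact Option.isSome_iff_exists.2 ⟨v, hs k v hv⟩

-- fuel monotonicity of the denotation
theorem Wd_mono (cm : List (String × List String)) (ws c0 : List (String × Int)) : ∀ f g, f ≤ g →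
    (∀ n v, Wd cm ws c0 f n = some v → Wd cm ws c0 g n = some v) ∧
    (∀ l t v, Wl cm ws c0 f l t = some v → Wl cm ws c0 g l t = some v) := by
  intro f
  induction f with
  | zero =>
    intro g hg
    constructor
    · intro n v h; simp [Wd] at h
    · intro l t v h
      cases l with
      | nil => simp [Wl] at h ⊢; exact h
      | cons c rest => simp [Wl, Wd] at h
  | succ f ih =>
    intro g hg
    obtain ⟨g, rfl⟩ : ∃ g', g = g' + 1 := ⟨g - 1, by omega⟩
    have hfg : f ≤ g := by omega
    have hWd : ∀ n v, Wd cm ws c0 (f+1) n = some v → Wd cm ws c0 (g+1) n = some v := by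
      intro n v h
      simp only [Wd] at h ⊢
      cases hc : pvLk c0 n with
      | some u => simp [hc] at h ⊢; exact h
      | none =>
        simp only [hc] at h ⊢
        cases hw : pvLk ws n with
        | none => simp [hw] at h
        | some w => simp only [hw] at h ⊢; exact (ih g hfg).2 _ _ _ h
    refine ⟨hWd, ?_⟩
    intro l
    induction l with
    | nil => intro t v h; simpa [Wl] using h
    | cons c rest ihl =>
      intro t v h
      simp only [Wl] at h ⊢
      cases hc : Wd cm ws c0 (f+1) c with
      | none => simp [hc] at h
      | some vc => simp only [hc] at h; simp only [hWd c vc hc]; exact ihl _ _ h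

theorem Wd_det (cm : List (String × List String)) (ws c0 : List (String × Int)) (f g : Nat) (n : String) (v v' : Int)
    (h1 : Wd cm ws c0 f n = some v) (h2 : Wd cm ws c0 g n = some v') : v = v' := by
  have ha := (Wd_mono cm ws c0 f (max f g) (le_max_left _ _)).1 n v h1
  have hb := (Wd_mono cm ws c0 g (max f g) (le_max_right _ _)).1 n v' h2
  rw [ha] at hb; exact (Option.some_inj.1 hb)

theorem foldl_add_shift (f : String → Int) : ∀ (l : List String) (t : Int),
    l.foldl (fun s c => s + f c) t = t + l.foldl (fun s c => s + f c) 0 := by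
  intro l
  induction l with
  | nil => simp
  | cons c rest ih =>
    intro t
    simp only [List.foldl_cons]
    rw [ih (t + f c), ih (0 + f c)]
    omega

-- evaluate Wl over children whose values are read off a resolved table
theorem Wl_eval (cm : List (String × List String)) (ws c0 totals : List (String × Int)) :
    ∀ (kids : List String) (t : Int),
    (∀ c ∈ kids, ∃ vc, pvLk totals c = some vc ∧ ∃ gc, Wd cm ws c0 gc c = some vc) →
    ∃ g, Wl cm ws c0 g kids t = some (kids.foldl (fun s c => s + (pvLk totals c).getD 0) t) := by
  intro kids
  induction kids with
  | nil => intro t _; exact ⟨0, by simp [Wl]⟩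
  | cons c rest ih =>
    intro t h
    obtain ⟨vc, hvc, gc, hgc⟩ := h c (List.mem_cons_self ..)
    obtain ⟨g, hg⟩ := ih (t + vc) (fun c hc => h c (List.mem_cons_of_mem _ hc))
    refine ⟨max gc g, ?_⟩
    simp only [Wl]
    rw [(Wd_mono cm ws c0 gc _ (le_max_left _ _)).1 c vc hgc]
    simp only [List.foldl_cons, hvc, Option.getD_some]
    exact (Wd_mono cm ws c0 g _ (le_max_right _ _)).2 rest (t + vc) _ hg

-- the threaded cache only grows
theorem goAs_ext (cm : List (String × List String)) (ws : List (String × Int)) (fuel : Nat)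
    (hA : ∀ n cache v cache', goA cm ws fuel n cache = some (v, cache') → SubK cache cache') :
    ∀ l total cache v cache', goAs cm ws fuel l total cache = some (v, cache') → SubK cache cache' := by
  intro l
  induction l with
  | nil => intro total cache v cache' h; simp [goAs] at h; rw [h.2]; exact SubK_refl _
  | cons c rest ih =>
    intro total cache v cache' h
    simp only [goAs] at h
    cases hg : goA cm ws fuel c cache with
    | none => simp [hg] at h
    | some r =>
      obtain ⟨v1, c1⟩ := r
      simp only [hg] at h
      exact SubK_trans (hA c cache v1 c1 hg) (ih _ _ _ _ h)

theorem goA_ext (cm : List (String × List String)) (ws : List (String × Int)) :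
    ∀ fuel n cache v cache', goA cm ws fuel n cache = some (v, cache') → SubK cache cache' := by
  intro fuel
  induction fuel with
  | zero => intro n cache v cache' h; simp [goA] at h
  | succ f ih =>
    intro n cache v cache' h
    simp only [goA] at h
    cases hc : pvLk cache n with
    | some u => simp [hc] at h; rw [← h.2]; exact SubK_refl _
    | none =>
      simp only [hc] at h
      cases hw : pvLk ws n with
      | none => simp [hw] at h
      | some w =>
        simp only [hw] at h
        cases hgs : goAs cm ws f (match pvLk cm n with | some kids => kids | none => []) w cache with
        | none => simp [hgs] at h
        | some r =>
          obtain ⟨t, c1⟩ := r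
          simp only [hgs] at h
          have h2 := goAs_ext cm ws f ih _ _ _ _ _ hgs
          have he : cache' = c1 ++ [(n, t)] := by
            have h3 := Option.some_inj.1 h
            exact (congrArg Prod.snd h3).symm
          rw [he]
          exact SubK_trans h2 (SubK_append c1 [(n, t)])

-- soundness: whatever A's recursion returns (and caches) is the denotation's value
theorem goAs_sound (cm : List (String × List String)) (ws c0 : List (String × Int)) (fuel : Nat)
    (hA : ∀ n cache v cache', InvW cm ws c0 cache → SubK c0 cache → goA cm ws fuel n cache = some (v, cache') →
      ((∃ g, Wd cm ws c0 g n = some v) ∧ InvW cm ws c0 cache')) :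
    ∀ l total cache v cache', InvW cm ws c0 cache → SubK c0 cache → goAs cm ws fuel l total cache = some (v, cache') →
      ((∃ g, Wl cm ws c0 g l total = some v) ∧ InvW cm ws c0 cache') := by
  intro l
  induction l with
  | nil =>
    intro total cache v cache' hI hS h
    simp only [goAs] at h
    obtain ⟨h1, h2⟩ := Prod.mk.injEq .. ▸ Option.some_inj.1 h
    subst h1; subst h2
    exact ⟨⟨0, by simp [Wl]⟩, hI⟩
  | cons c rest ih =>
    intro total cache v cache' hI hS h
    simp only [goAs] at h
    cases hg : goA cm ws fuel c cache with
    | none => simp [hg] at h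
    | some r =>
      obtain ⟨v1, c1⟩ := r
      simp only [hg] at h
      obtain ⟨⟨g1, hg1⟩, hI1⟩ := hA c cache v1 c1 hI hS hg
      have hS1 : SubK c0 c1 := SubK_trans hS (goA_ext cm ws fuel c cache v1 c1 hg)
      obtain ⟨⟨g2, hg2⟩, hI2⟩ := ih _ _ _ _ hI1 hS1 h
      refine ⟨⟨max g1 g2, ?_⟩, hI2⟩
      simp only [Wl]
      rw [(Wd_mono cm ws c0 g1 _ (le_max_left _ _)).1 c v1 hg1]
      exact (Wd_mono cm ws c0 g2 _ (le_max_right _ _)).2 rest (total + v1) v hg2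

theorem goA_sound (cm : List (String × List String)) (ws c0 : List (String × Int)) :
    ∀ fuel n cache v cache', InvW cm ws c0 cache → SubK c0 cache → goA cm ws fuel n cache = some (v, cache') →
      ((∃ g, Wd cm ws c0 g n = some v) ∧ InvW cm ws c0 cache') := by
  intro fuel
  induction fuel with
  | zero => intro n cache v cache' _ _ h; simp [goA] at h
  | succ f ih =>
    intro n cache v cache' hI hS h
    simp only [goA] at h
    cases hc : pvLk cache n with
    | some u =>
      simp only [hc] at h
      obtain ⟨h1, h2⟩ := Prod.mk.injEq .. ▸ Option.some_inj.1 h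
      subst h1; subst h2
      exact ⟨hI n u hc, hI⟩
    | none =>
      simp only [hc] at h
      have hc0 : pvLk c0 n = none := by
        cases hx : pvLk c0 n with
        | none => rfl
        | some u => rw [hS n u hx] at hc; cases hc
      cases hw : pvLk ws n with
      | none => simp [hw] at h
      | some w =>
        simp only [hw] at h
        cases hgs : goAs cm ws f (match pvLk cm n with | some kids => kids | none => []) w cache with
        | none => simp [hgs] at h
        | some r =>
          obtain ⟨t, c1⟩ := r
          simp only [hgs] at h
          obtain ⟨h1, h2⟩ := Prod.mk.injEq .. ▸ Option.some_inj.1 h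
          subst h1
          obtain ⟨⟨g, hgW⟩, hI1⟩ := goAs_sound cm ws c0 f ih _ _ _ _ _ hI hS hgs
          have hval : Wd cm ws c0 (g + 1) n = some t := by
            simp only [Wd, hc0, hw]
            have : (match pvLk cm n with | some kids => kids | none => []) = (pvLk cm n).getD [] := by
              cases pvLk cm n <;> rfl
            rw [← this]
            exact hgW
          refine ⟨⟨g + 1, hval⟩, ?_⟩
          intro k u hk
          rw [← h2] at hk
          cases hx : pvLk c1 k with
          | some u1 =>
            rw [pvLk_append_some c1 [(n, t)] k u1 hx] at hk
            have : u1 = u := Option.some_inj.1 hk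
            exact hI1 k u (this ▸ hx)
          | none =>
            rw [pvLk_append_none c1 [(n, t)] k hx] at hk
            by_cases hkn : n = k
            · subst hkn
              simp only [pvLk, if_pos rfl] at hk
              exact ⟨g + 1, (Option.some_inj.1 hk) ▸ hval⟩
            · simp [pvLk, hkn] at hk

theorem satR_top (cm : List (String × List String)) (ws : List (String × Int)) :
    ∀ i s, satR cm ws (i + 1) s = stepR cm ws (satR cm ws i s) := by
  intro i
  induction i with
  | zero => intro s; simp [satR]
  | succ j ih => intro s; simp only [satR]; exact ih (stepR cm ws s)

-- completeness: on resolvable programs A's recursion succeeds within the fuel bound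
theorem goAs_complete (cm : List (String × List String)) (ws : List (String × Int)) (keys0 : List String) (fuel : Nat) (sat : List String)
    (hA : ∀ n cache, sat.contains n = true → KeysIn keys0 cache → ∃ r, goA cm ws fuel n cache = some r) :
    ∀ (l : List String) (total : Int) (cache : List (String × Int)),
      (∀ c ∈ l, sat.contains c = true) → KeysIn keys0 cache →
      ∃ r, goAs cm ws fuel l total cache = some r := by
  intro l
  induction l with
  | nil => intro total cache _ _; exact ⟨(total, cache), by simp [goAs]⟩
  | cons c rest ih =>
    intro total cache hl hk
    obtain ⟨⟨v1, c1⟩, hg⟩ := hA c cache (hl c (List.mem_cons_self ..)) hk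
    have hk1 : KeysIn keys0 c1 := KeysIn_mono (goA_ext cm ws fuel c cache v1 c1 hg) hk
    obtain ⟨r, hr⟩ := ih (total + v1) c1 (fun x hx => hl x (List.mem_cons_of_mem _ hx)) hk1
    exact ⟨r, by simp only [goAs, hg]; exact hr⟩

theorem goA_complete (cm : List (String × List String)) (ws : List (String × Int)) (keys0 : List String) :
    ∀ i n fuel cache, (satR cm ws i keys0).contains n = true → i < fuel → KeysIn keys0 cache →
      ∃ r, goA cm ws fuel n cache = some r := by
  intro i
  induction i with
  | zero =>
    intro n fuel cache hn hf hk
    obtain ⟨f, rfl⟩ : ∃ f, fuel = f + 1 := ⟨fuel - 1, by omega⟩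
    have := hk n (by simpa [satR] using hn)
    obtain ⟨v, hv⟩ := Option.isSome_iff_exists.1 this
    exact ⟨(v, cache), by simp [goA, hv]⟩
  | succ i ih =>
    intro n fuel cache hn hf hk
    rw [satR_top] at hn
    unfold stepR at hn
    rw [List.contains_append] at hn
    rcases Bool.or_eq_true_iff.1 hn with hn | hn
    · exact ih n fuel cache hn (by omega) hk
    · have hmem := List.contains_iff_mem.1 hn
      rw [List.mem_filter] at hmem
      obtain ⟨hmemf, hcond⟩ := hmem
      rw [Bool.and_eq_true] at hcond
      obtain ⟨_, hkids⟩ := hcond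
      rw [lookup_eq_pvLk] at hkids
      obtain ⟨f, rfl⟩ : ∃ f, fuel = f + 1 := ⟨fuel - 1, by omega⟩
      cases hc : pvLk cache n with
      | some v => exact ⟨(v, cache), by simp [goA, hc]⟩
      | none =>
        obtain ⟨w, hw⟩ := Option.isSome_iff_exists.1 ((pvLk_isSome_iff ws n).2 hmemf)
        have hkidsall : ∀ c ∈ (pvLk cm n).getD [], (satR cm ws i keys0).contains c = true := by
          intro c hcmem
          exact List.all_eq_true.1 hkids c hcmem
        obtain ⟨⟨t, c1⟩, hgs⟩ := goAs_complete cm ws keys0 f (satR cm ws i keys0)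
          (fun m cache2 hm hk2 => ih m f cache2 hm (by omega) hk2)
          ((pvLk cm n).getD []) w cache hkidsall hk
        refine ⟨(t, c1 ++ [(n, t)]), ?_⟩
        simp only [goA, hc, hw]
        have hmatch : (match pvLk cm n with | some kids => kids | none => []) = (pvLk cm n).getD [] := by
          cases pvLk cm n <;> rfl
        rw [hmatch, hgs]

-- one pass of B only appends entries
theorem passB_ext (cm : List (String × List String)) :
    ∀ (rest totals : List (String × Int)) (ch : Bool), SubK totals (passB cm rest (totals, ch)).1 := by
  intro rest
  induction rest with
  | nil => intro totals ch; exact SubK_refl _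
  | cons p tail ih =>
    intro totals ch
    obtain ⟨k, w⟩ := p
    simp only [passB]
    split
    · exact ih totals ch
    · split
      · exact SubK_trans (SubK_append totals _) (ih _ true)
      · exact ih totals ch

theorem passB_true (cm : List (String × List String)) :
    ∀ (rest totals : List (String × Int)), (passB cm rest (totals, true)).2 = true := by
  intro rest
  induction rest with
  | nil => intro totals; rfl
  | cons p tail ih =>
    intro totals
    obtain ⟨k, w⟩ := p
    simp only [passB]
    split
    · exact ih totals
    · split
      · exact ih _
      · exact ih totals

theorem passB_stable (cm : List (String × List String)) :
    ∀ (rest totals : List (String × Int)), (passB cm rest (totals, false)).2 = false →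
      (passB cm rest (totals, false)).1 = totals ∧
      ∀ kw ∈ rest, (pvLk totals kw.1).isSome = true ∨
        (((pvLk cm kw.1).getD []).all (fun c => (pvLk totals c).isSome)) = false := by
  intro rest
  induction rest with
  | nil => intro totals _; exact ⟨rfl, by simp⟩
  | cons p tail ih =>
    intro totals h
    obtain ⟨k, w⟩ := p
    by_cases hin : (pvLk totals k).isSome = true
    · have heq : passB cm ((k, w) :: tail) (totals, false) = passB cm tail (totals, false) := by
        simp [passB, hin]
      rw [heq] at h ⊢
      obtain ⟨h1, h2⟩ := ih totals h
      refine ⟨h1, ?_⟩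
      intro kw hkw
      rcases List.mem_cons.1 hkw with rfl | hkw
      · exact Or.inl hin
      · exact h2 kw hkw
    · by_cases hall : (((pvLk cm k).getD []).all (fun c => (pvLk totals c).isSome)) = true
      · exfalso
        have heq : passB cm ((k, w) :: tail) (totals, false) =
            passB cm tail (totals ++ [(k, w + ((pvLk cm k).getD []).foldl (fun s c => s + (pvLk totals c).getD 0) 0)], true) := by
          simp [passB, hin, hall]
        rw [heq] at h
        have := passB_true cm tail (totals ++ [(k, w + ((pvLk cm k).getD []).foldl (fun s c => s + (pvLk totals c).getD 0) 0)])
        rw [h] at this; cases this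
      · have heq : passB cm ((k, w) :: tail) (totals, false) = passB cm tail (totals, false) := by
          simp [passB, hin, hall]
        rw [heq] at h ⊢
        obtain ⟨h1, h2⟩ := ih totals h
        refine ⟨h1, ?_⟩
        intro kw hkw
        rcases List.mem_cons.1 hkw with rfl | hkw
        · exact Or.inr (by simpa using hall)
        · exact h2 kw hkw

-- one pass of B keeps the soundness invariant
theorem passB_inv (cm : List (String × List String)) (ws c0 : List (String × Int)) :
    ∀ (rest totals : List (String × Int)) (ch : Bool),
      (∀ kw ∈ rest, pvLk ws kw.1 = some kw.2) →
      InvW cm ws c0 totals → KeysIn (c0.map Prod.fst) totals →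
      InvW cm ws c0 (passB cm rest (totals, ch)).1 := by
  intro rest
  induction rest with
  | nil => intro totals ch _ hI _; exact hI
  | cons p tail ih =>
    intro totals ch hws hI hk0
    obtain ⟨k, w⟩ := p
    have hwsk : pvLk ws k = some w := hws (k, w) (List.mem_cons_self ..)
    have hwstail : ∀ kw ∈ tail, pvLk ws kw.1 = some kw.2 := fun kw hkw => hws kw (List.mem_cons_of_mem _ hkw)
    simp only [passB]
    split
    · exact ih totals ch hwstail hI hk0
    · split
      · rename_i hnin hall
        set kids := (pvLk cm k).getD [] with hkids
        set newv := w + kids.foldl (fun s c => s + (pvLk totals c).getD 0) 0 with hnewv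
        have hIk : ∃ g, Wd cm ws c0 g k = some newv := by
          have hc0 : pvLk c0 k = none := by
            cases hx : pvLk c0 k with
            | none => rfl
            | some u =>
              have : (pvLk totals k).isSome = true := by
                apply hk0 k
                apply List.contains_iff_mem.2
                exact (pvLk_isSome_iff c0 k).1 (by simp [hx])
              simp [this] at hnin
          obtain ⟨g, hg⟩ := Wl_eval cm ws c0 totals kids w (by
            intro c hc
            have hcs : (pvLk totals c).isSome = true := List.all_eq_true.1 hall c hc
            obtain ⟨vc, hvc⟩ := Option.isSome_iff_exists.1 hcs
            exact ⟨vc, hvc, hI c vc hvc⟩)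
          refine ⟨g + 1, ?_⟩
          simp only [Wd, hc0, hwsk]
          rw [← hkids, hg]
          congr 1
          rw [hnewv, foldl_add_shift]
        have hI' : InvW cm ws c0 (totals ++ [(k, newv)]) := by
          intro x u hx
          cases hy : pvLk totals x with
          | some u1 =>
            rw [pvLk_append_some totals _ x u1 hy] at hx
            exact hI x u ((Option.some_inj.1 hx) ▸ hy)
          | none =>
            rw [pvLk_append_none totals _ x hy] at hx
            by_cases hxk : k = x
            · subst hxk
              simp only [pvLk, if_pos rfl] at hx
              exact (Option.some_inj.1 hx) ▸ hIk
            · simp [pvLk, hxk] at hx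
        exact ih _ true hwstail hI' (KeysIn_mono (SubK_append totals _) hk0)
      · exact ih totals ch hwstail hI hk0

-- one pass of B resolves everything the abstract step resolves
theorem passB_cover (cm : List (String × List String)) :
    ∀ (rest totals : List (String × Int)) (ch : Bool) (s : List String),
      KeysIn s totals →
      ∀ k, k ∈ (rest.map Prod.fst).filter (fun k => !s.contains k && ((List.lookup k cm).getD []).all s.contains) →
      (pvLk (passB cm rest (totals, ch)).1 k).isSome = true := by
  intro rest
  induction rest with
  | nil => intro totals ch s _ k hk; simp at hk
  | cons p tail ih =>
    intro totals ch s hs k hk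
    obtain ⟨k0, w0⟩ := p
    simp only [List.map_cons, List.filter_cons] at hk
    have htail : k ∈ (tail.map Prod.fst).filter (fun k => !s.contains k && ((List.lookup k cm).getD []).all s.contains) →
        (pvLk (passB cm ((k0, w0) :: tail) (totals, ch)).1 k).isSome = true := by
      intro hmem
      simp only [passB]
      split
      · exact ih totals ch s hs k hmem
      · split
        · exact ih _ true s (KeysIn_mono (SubK_append totals _) hs) k hmem
        · exact ih totals ch s hs k hmem
    split at hk
    · rename_i hcond
      rcases List.mem_cons.1 hk with rfl | hmem
      · -- k = k0 : the pass resolves it (or it is already resolved)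
        rw [Bool.and_eq_true] at hcond
        rw [lookup_eq_pvLk] at hcond
        have hallt : (((pvLk cm k).getD []).all (fun c => (pvLk totals c).isSome)) = true := by
          rw [List.all_eq_true]
          intro c hc
          exact hs c (List.all_eq_true.1 hcond.2 c hc)
        by_cases hin : (pvLk totals k).isSome = true
        · obtain ⟨v, hv⟩ := Option.isSome_iff_exists.1 hin
          have heq : passB cm ((k, w0) :: tail) (totals, ch) = passB cm tail (totals, ch) := by
            simp [passB, hin]
          rw [heq]
          have := passB_ext cm tail totals ch k v hv
          simp [this]
        · have heq : passB cm ((k, w0) :: tail) (totals, ch) =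
              passB cm tail (totals ++ [(k, w0 + ((pvLk cm k).getD []).foldl (fun s c => s + (pvLk totals c).getD 0) 0)], true) := by
            simp [passB, hin, hallt]
          rw [heq]
          have hv : pvLk (totals ++ [(k, w0 + ((pvLk cm k).getD []).foldl (fun s c => s + (pvLk totals c).getD 0) 0)]) k
              = some (w0 + ((pvLk cm k).getD []).foldl (fun s c => s + (pvLk totals c).getD 0) 0) := by
            rw [pvLk_append_none totals _ k (by
              cases hx : pvLk totals k with
              | none => rfl
              | some u => simp [hx] at hin)]
            simp [pvLk]
          have := passB_ext cm tail _ true k _ hv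
          simp [this]
      · exact htail hmem
    · exact htail hk

theorem loopB_ext (cm : List (String × List String)) (ws : List (String × Int)) :
    ∀ f totals, SubK totals (loopB cm ws f totals) := by
  intro f
  induction f with
  | zero => intro totals; exact SubK_refl _
  | succ f ih =>
    intro totals
    simp only [loopB]
    cases h : passB cm ws (totals, false) with
    | mk t' ch =>
      have hext : SubK totals t' := by have := passB_ext cm ws totals false; rw [h] at this; exact this
      cases ch
      · exact hext
      · exact SubK_trans hext (ih t')

theorem stable_sat (cm : List (String × List String)) (ws : List (String × Int)) :
    ∀ totals, (∀ kw ∈ ws, (pvLk totals kw.1).isSome = true ∨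
        (((pvLk cm kw.1).getD []).all (fun c => (pvLk totals c).isSome)) = false) →
      ∀ i s, KeysIn s totals → KeysIn (satR cm ws i s) totals := by
  intro totals hstable i
  induction i with
  | zero => intro s hs; simpa [satR] using hs
  | succ i ih =>
    intro s hs
    simp only [satR]
    apply ih
    intro k hk
    unfold stepR at hk
    rw [List.contains_append] at hk
    rcases Bool.or_eq_true_iff.1 hk with hk | hk
    · exact hs k hk
    · have hmem := List.contains_iff_mem.1 hk
      rw [List.mem_filter] at hmem
      obtain ⟨hmemf, hcond⟩ := hmem
      rw [Bool.and_eq_true] at hcond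
      obtain ⟨kw, hkw, rfl⟩ := List.mem_map.1 hmemf
      rw [lookup_eq_pvLk] at hcond
      rcases hstable kw hkw with h | h
      · exact h
      · exfalso
        have : (((pvLk cm kw.1).getD []).all (fun c => (pvLk totals c).isSome)) = true := by
          rw [List.all_eq_true]
          intro c hc
          exact hs c (List.all_eq_true.1 hcond.2 c hc)
        rw [this] at h; cases h

theorem loopB_cover (cm : List (String × List String)) (ws : List (String × Int)) :
    ∀ f i s totals, i ≤ f → KeysIn s totals →
      ∀ k, (satR cm ws i s).contains k = true → (pvLk (loopB cm ws f totals) k).isSome = true := by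
  intro f
  induction f with
  | zero =>
    intro i s totals hif hs k hk
    obtain rfl : i = 0 := by omega
    exact hs k (by simpa [satR] using hk)
  | succ f ih =>
    intro i s totals hif hs k hk
    simp only [loopB]
    cases h : passB cm ws (totals, false) with
    | mk t' ch =>
      cases ch
      · -- stable: totals already closed
        obtain ⟨h1, h2⟩ := passB_stable cm ws totals (by rw [h])
        have ht' : t' = totals := by rw [h] at h1; exact h1
        subst ht'
        exact stable_sat cm ws t' h2 i s hs k hk
      · cases i with
        | zero =>
          have := hs k (by simpa [satR] using hk)
          obtain ⟨v, hv⟩ := Option.isSome_iff_exists.1 this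
          have hv' : pvLk t' k = some v := by
            have := passB_ext cm ws totals false k v hv; rw [h] at this; exact this
          exact Option.isSome_iff_exists.2 ⟨v, loopB_ext cm ws f t' k v hv'⟩
        | succ j =>
          apply ih j (stepR cm ws s) t' (by omega) ?_ k (by simpa [satR] using hk)
          intro x hx
          unfold stepR at hx
          rw [List.contains_append] at hx
          rcases Bool.or_eq_true_iff.1 hx with hx | hx
          · obtain ⟨v, hv⟩ := Option.isSome_iff_exists.1 (hs x hx)
            have := passB_ext cm ws totals false x v hv; rw [h] at this
            simp [this]
          · have := passB_cover cm ws totals false s hs x (List.contains_iff_mem.1 hx)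
            rw [h] at this; exact this

theorem loopB_inv (cm : List (String × List String)) (ws c0 : List (String × Int)) :
    ∀ f totals, (∀ kw ∈ ws, pvLk ws kw.1 = some kw.2) →
      InvW cm ws c0 totals → KeysIn (c0.map Prod.fst) totals →
      InvW cm ws c0 (loopB cm ws f totals) := by
  intro f
  induction f with
  | zero => intro totals _ hI _; exact hI
  | succ f ih =>
    intro totals hws hI hk0
    simp only [loopB]
    cases h : passB cm ws (totals, false) with
    | mk t' ch =>
      have hIt' : InvW cm ws c0 t' := by
        have := passB_inv cm ws c0 ws totals false hws hI hk0; rw [h] at this; exact this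
      have hk0t' : KeysIn (c0.map Prod.fst) t' := by
        apply KeysIn_mono ?_ hk0
        have := passB_ext cm ws totals false; rw [h] at this; exact this
      cases ch
      · exact hIt'
      · exact ih t' hws hIt' hk0t'

theorem get_tower_weight_spec : Claim_equal_get_tower_weight := by
  intro root cm ws wc _hdom hpre
  obtain ⟨hsat, hnodup⟩ := hpre
  unfold Spec_get_tower_weight
  -- initial cache facts
  have hkeys0 : KeysIn (wc.map Prod.fst) wc := by
    intro k hk
    exact (pvLk_isSome_iff wc k).2 (List.contains_iff_mem.1 hk)
  have hI0 : InvW cm ws wc wc := by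
    intro k v hv
    exact ⟨1, by simp [Wd, hv]⟩
  have hws : ∀ kw ∈ ws, pvLk ws kw.1 = some kw.2 := by
    intro kw hkw
    exact pvLk_of_mem_nodup ws kw.1 kw.2 hnodup hkw
  -- A side: the recursion succeeds and returns the denotation's value
  obtain ⟨⟨v, cf⟩, hgo⟩ := goA_complete cm ws (wc.map Prod.fst) ws.length root (ws.length + 1) wc hsat (by omega) hkeys0
  obtain ⟨⟨g, hWv⟩, _⟩ := goA_sound cm ws wc (ws.length + 1) root wc v cf hI0 (SubK_refl wc) hgo
  -- B side: the fixpoint loop resolves root with the denotation's value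
  have hcov := loopB_cover cm ws (ws.length + 1) ws.length (wc.map Prod.fst) wc (by omega) hkeys0 root hsat
  obtain ⟨v', hv'⟩ := Option.isSome_iff_exists.1 hcov
  obtain ⟨g', hWv'⟩ := loopB_inv cm ws wc (ws.length + 1) wc hws hI0 hkeys0 root v' hv'
  have hvv : v = v' := Wd_det cm ws wc g g' root v v' hWv hWv'
  unfold get_tower_weight get_tower_weight_alt
  rw [hgo, hv', hvv]
  rfl
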